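-- pv_equiv track=rewrite | github.com/aasishtammana/Artificial-Intelligence | Project 3/3.logicagent/3.logicagent/wumpus_kb.py | axiom_generator_at_most_one_wumpus
-- ===== SOURCE A (Python) =====
-- def wumpus_str(x, y):
--     "There is a Wumpus at <x>,<y>"
--     return 'W{0}_{1}'.format(x, y)
--
-- def axiom_generator_at_most_one_wumpus(xmin, xmax, ymin, ymax):
--     """
--     Assert that there is at at most one Wumpus.
--
--     xmin, xmax, ymin, ymax := the bounds of the environment.
--     """
--     axiom_str = ''
--     "*** YOUR CODE HERE ***"
--     allcells = []
--     temp = [] #Define temporary variables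
--
--     x=xmin#Set lower bound of x
--     while x<=xmax:#Check x max bound
--         y=ymin#Set lower bound of y
--         while y<=ymax:#Check y max bound
--             allcells.append((x, y))
--             y+=1
--         x+=1
--     for cell in allcells: #iterate through all the blocks
--         allothercells = []
--         for othercells in allcells: #For every block, create an array which checks if wumpus is present in all the other blocks
--             if othercells != cell: #Identify all the blocks which are not current block
--                 allothercells+=[othercells]
--         wumpuscheck = []
--         for item in allothercells:# for all the other blocks
--             wumpuscheck+=['~' + wumpus_str(item[0], item[1])]#Assert wumpus is not present
--         wumpuscheckoutput=' & '.join(wumpuscheck)#Join the prepositions with and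
--         temp+=['('+wumpus_str(cell[0],cell[1])+' >> ('+wumpuscheckoutput+'))'] #If wumpus is present in current location it means it is not present in all other locations
--     axiom_str = ' & '.join(temp) #Join the expressions with the and clause
--     # Comment or delete the next line once this function has been implemented.
--     return axiom_str
-- ===== SOURCE B (Python) =====
-- def wumpus_str(x, y):
--     "There is a Wumpus at <x>,<y>"
--     return 'W{0}_{1}'.format(x, y)
--
-- def axiom_generator_at_most_one_wumpus(xmin, xmax, ymin, ymax):
--     # Prefix/suffix-join ("except-self") algorithm: one left-to-right scan builds,
--     # for each cell, the joined negations of all earlier cells; one right-to-left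
--     # scan builds the joined negations of all later cells; each clause body is
--     # just the two pieces glued together -- no per-cell rescan/re-join of the grid.
--     lits = [wumpus_str(x, y) for x in range(xmin, xmax + 1)
--                              for y in range(ymin, ymax + 1)]
--
--     def glue(a, b):
--         return a + ' & ' + b if a and b else a + b
--
--     pref, acc = [], ''
--     for lit in lits:
--         pref.append(acc)
--         acc = glue(acc, '~' + lit)
--     suf, acc = [], ''
--     for lit in reversed(lits):
--         suf.append(acc)
--         acc = glue('~' + lit, acc)
--     suf.reverse()
--     clauses = ['(' + lit + ' >> (' + glue(p, s) + '))'
--                for lit, p, s in zip(lits, pref, suf)]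
--     return ' & '.join(clauses)
-- ===== Notes on version B (the rewrite author's own statement) =====
-- stated objective: alternative
-- what changed: Replaces A's per-cell rescan-filter-and-join of the whole grid by the prefix/suffix-scan (join-except-self) pattern: one left-to-right pass accumulates the joined negations of all earlier cells, one right-to-left pass those of all later cells, and each clause body is the two precomputed pieces glued together.
import Mathlib
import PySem

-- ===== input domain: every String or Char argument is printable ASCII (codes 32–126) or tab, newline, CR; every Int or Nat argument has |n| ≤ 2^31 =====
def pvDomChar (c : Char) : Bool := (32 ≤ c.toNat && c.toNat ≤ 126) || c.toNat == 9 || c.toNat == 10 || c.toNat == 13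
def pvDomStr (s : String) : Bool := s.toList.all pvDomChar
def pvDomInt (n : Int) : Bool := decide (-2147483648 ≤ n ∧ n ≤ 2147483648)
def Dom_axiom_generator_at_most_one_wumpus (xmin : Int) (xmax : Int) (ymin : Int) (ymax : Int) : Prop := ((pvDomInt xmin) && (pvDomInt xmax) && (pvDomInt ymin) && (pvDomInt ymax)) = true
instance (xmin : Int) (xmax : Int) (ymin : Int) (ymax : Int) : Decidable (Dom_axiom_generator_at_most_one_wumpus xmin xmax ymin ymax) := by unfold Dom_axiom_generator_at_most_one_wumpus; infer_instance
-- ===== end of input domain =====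

-- B replaces A's per-cell rescan-filter-and-join of the whole grid by the prefix/suffix-scan
-- (join-except-self) pattern: a left-to-right pass accumulating the joined negations of earlier
-- cells, a right-to-left pass for later cells, each clause body gluing the two pieces; same output.
-- ===== PORT A =====
-- wumpus_str: 'W{0}_{1}'.format(x, y)
def wumpusStr (x : Int) (y : Int) : String :=
  "W" ++ PySem.Int.toStr x ++ "_" ++ PySem.Int.toStr y

-- inner 'while y<=ymax' loop, appending (x, y)
def aLoopY (x : Int) (y : Int) (ymax : Int) (acc : List (Int × Int)) : List (Int × Int) :=
  if y ≤ ymax then aLoopY x (y + 1) ymax (acc ++ [(x, y)]) else acc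
termination_by (ymax + 1 - y).toNat
decreasing_by omega

-- outer 'while x<=xmax' loop
def aLoopX (x : Int) (xmax : Int) (ymin : Int) (ymax : Int) (acc : List (Int × Int)) : List (Int × Int) :=
  if x ≤ xmax then aLoopX (x + 1) xmax ymin ymax (aLoopY x ymin ymax acc) else acc
termination_by (xmax + 1 - x).toNat
decreasing_by omega

def axiom_generator_at_most_one_wumpus (xmin : Int) (xmax : Int) (ymin : Int) (ymax : Int) : String :=
  let allcells := aLoopX xmin xmax ymin ymax []
  let temp := allcells.foldl (fun temp cell =>
    let allothercells := allcells.foldl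
      (fun acc othercells => if othercells ≠ cell then acc ++ [othercells] else acc) []
    let wumpuscheck := allothercells.foldl
      (fun acc item => acc ++ ["~" ++ wumpusStr item.1 item.2]) []
    let wumpuscheckoutput := PySem.Str.join " & " wumpuscheck
    temp ++ ["(" ++ wumpusStr cell.1 cell.2 ++ " >> (" ++ wumpuscheckoutput ++ "))"]) []
  PySem.Str.join " & " temp

-- ===== PORT B =====
-- glue(a, b): a + ' & ' + b if a and b else a + b
def glueStr (a : String) (b : String) : String :=
  if a ≠ "" ∧ b ≠ "" then a ++ " & " ++ b else a ++ b

def axiom_generator_at_most_one_wumpus_alt (xmin : Int) (xmax : Int) (ymin : Int) (ymax : Int) : String :=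
  let lits := (PySem.List.pyRange xmin (xmax + 1) 1).flatMap
    (fun x => (PySem.List.pyRange ymin (ymax + 1) 1).map (fun y => wumpusStr x y))
  -- 'for lit in lits: pref.append(acc); acc = glue(acc, "~" + lit)'
  let pr := lits.foldl (fun st lit => (st.1 ++ [st.2], glueStr st.2 ("~" ++ lit)))
    (([] : List String), "")
  let pref := pr.1
  -- 'for lit in reversed(lits): suf.append(acc); acc = glue("~" + lit, acc)' then suf.reverse()
  let sf := lits.reverse.foldl (fun st lit => (st.1 ++ [st.2], glueStr ("~" ++ lit) st.2))
    (([] : List String), "")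
  let suf := sf.1.reverse
  let clauses := (lits.zip (pref.zip suf)).map
    (fun t => "(" ++ t.1 ++ " >> (" ++ glueStr t.2.1 t.2.2 ++ "))")
  PySem.Str.join " & " clauses

-- ===== PRECONDITION & SPEC =====
def Spec_axiom_generator_at_most_one_wumpus (xmin : Int) (xmax : Int) (ymin : Int) (ymax : Int) (out : String) : Prop := out = axiom_generator_at_most_one_wumpus_alt xmin xmax ymin ymax
instance (xmin : Int) (xmax : Int) (ymin : Int) (ymax : Int) (out : String) : Decidable (Spec_axiom_generator_at_most_one_wumpus xmin xmax ymin ymax out) := by unfold Spec_axiom_generator_at_most_one_wumpus; infer_instance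

-- ===== CLAIM (what is proved, stated in full; the proofs are below) =====
def Claim_equal_axiom_generator_at_most_one_wumpus : Prop := ∀ (xmin : Int) (xmax : Int) (ymin : Int) (ymax : Int), Dom_axiom_generator_at_most_one_wumpus xmin xmax ymin ymax → Spec_axiom_generator_at_most_one_wumpus xmin xmax ymin ymax (axiom_generator_at_most_one_wumpus xmin xmax ymin ymax)

-- ===== LEMMAS AND PROOFS =====

theorem aLoopY_eq (x : Int) (y : Int) (ymax : Int) (acc : List (Int × Int)) :
    aLoopY x y ymax acc = acc ++ (PySem.List.pyRange y (ymax + 1) 1).map (fun v => (x, v)) := by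
  fun_induction aLoopY x y ymax acc with
  | case1 y acc h ih =>
    rw [ih, PySem.List.pyRange_one_cons (show y < ymax + 1 by omega)]
    simp
  | case2 y acc h =>
    rw [PySem.List.pyRange_one_eq_nil (show ymax + 1 ≤ y by omega)]
    simp

theorem aLoopX_eq (x : Int) (xmax : Int) (ymin : Int) (ymax : Int) (acc : List (Int × Int)) :
    aLoopX x xmax ymin ymax acc = acc ++ (PySem.List.pyRange x (xmax + 1) 1).flatMap
      (fun u => (PySem.List.pyRange ymin (ymax + 1) 1).map (fun v => (u, v))) := by
  fun_induction aLoopX x xmax ymin ymax acc with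
  | case1 x acc h ih =>
    rw [ih, aLoopY_eq, PySem.List.pyRange_one_cons (show x < xmax + 1 by omega)]
    simp
  | case2 x acc h =>
    rw [PySem.List.pyRange_one_eq_nil (show xmax + 1 ≤ x by omega)]
    simp

theorem cells_nodup (xmin xmax ymin ymax : Int) :
    ((PySem.List.pyRange xmin (xmax + 1) 1).flatMap
      (fun u => (PySem.List.pyRange ymin (ymax + 1) 1).map (fun v => (u, v)))).Nodup := by
  have h : (PySem.List.pyRange xmin (xmax + 1) 1).flatMap
      (fun u => (PySem.List.pyRange ymin (ymax + 1) 1).map (fun v => (u, v)))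
      = PySem.List.pyRange xmin (xmax + 1) 1 ×ˢ PySem.List.pyRange ymin (ymax + 1) 1 := rfl
  rw [h]
  exact (PySem.List.nodup_pyRange_one _ _).product (PySem.List.nodup_pyRange_one _ _)

-- in a duplicate-free list, filtering out the value at index i is deleting index i
theorem filter_ne_getElem {α : Type} [DecidableEq α] (l : List α) (hnd : l.Nodup)
    (i : Nat) (hi : i < l.length) :
    l.filter (fun oc => decide (oc ≠ l[i])) = l.take i ++ l.drop (i + 1) := by
  induction l generalizing i with
  | nil => simp at hi
  | cons a t ih =>
    rcases List.nodup_cons.mp hnd with ⟨ha, hnt⟩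
    cases i with
    | zero =>
      simp only [List.getElem_cons_zero, List.take_zero, List.drop_succ_cons, List.drop_zero,
        List.nil_append, List.filter_cons]
      simp only [ne_eq, not_true_eq_false, decide_false]
      exact List.filter_eq_self.mpr (fun b hb => by simp; rintro rfl; exact ha hb)
    | succ j =>
      have hj : j < t.length := by simpa using hi
      have hne : a ≠ t[j] := fun h => ha (h ▸ List.getElem_mem hj)
      have ht := ih hnt j hj
      simp only [ne_eq] at ht
      simp only [List.getElem_cons_succ, List.filter_cons, ne_eq, hne, not_false_eq_true,
        decide_true, if_true]
      simp only [decide_not] at ht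
      simp [ht]

-- String-level facts about ' & '-joins
theorem join_nil' : PySem.Str.join " & " ([] : List String) = "" := by
  apply String.toList_inj.mp
  simp [PySem.Str.toList_join, PySem.Chars.join, List.intercalate]

theorem join_single (x : String) : PySem.Str.join " & " [x] = x := by
  apply String.toList_inj.mp
  rw [PySem.Str.toList_join]
  simp [PySem.Chars.join, List.intercalate]

theorem chars_join_cons (sep : List Char) (a : List Char) (t : List (List Char)) (ht : t ≠ []) :
    PySem.Chars.join sep (a :: t) = a ++ sep ++ PySem.Chars.join sep t := by
  cases t with
  | nil => exact absurd rfl ht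
  | cons b r => exact PySem.Chars.join_cons_cons sep a b r

theorem chars_join_append (sep : List Char) (m1 m2 : List (List Char))
    (h1 : m1 ≠ []) (h2 : m2 ≠ []) :
    PySem.Chars.join sep (m1 ++ m2)
      = PySem.Chars.join sep m1 ++ sep ++ PySem.Chars.join sep m2 := by
  induction m1 with
  | nil => exact absurd rfl h1
  | cons a t ih =>
    cases t with
    | nil =>
      rw [List.cons_append, List.nil_append, chars_join_cons sep a m2 h2,
        PySem.Chars.join_singleton]
    | cons c s =>
      rw [List.cons_append, chars_join_cons sep a ((c :: s) ++ m2) (by simp),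
        ih (by simp), chars_join_cons sep a (c :: s) (by simp)]
      simp [List.append_assoc]

-- join over a nonempty head list is a nonempty string
theorem join_cons_ne (a : String) (t : List String) (ha : a ≠ "") :
    PySem.Str.join " & " (a :: t) ≠ "" := by
  intro h
  have h' := congrArg String.toList h
  rw [PySem.Str.toList_join] at h'
  cases t with
  | nil =>
    simp only [List.map_cons, List.map_nil, PySem.Chars.join, List.intercalate] at h'
    simp at h'
    exact ha (String.toList_inj.mp (by simp [h']))
  | cons b r =>
    simp only [List.map_cons] at h'
    rw [PySem.Chars.join_cons_cons] at h'
    simp at h'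

theorem join_append (l1 l2 : List String) (h1 : l1 ≠ []) (h2 : l2 ≠ []) :
    PySem.Str.join " & " (l1 ++ l2)
      = PySem.Str.join " & " l1 ++ " & " ++ PySem.Str.join " & " l2 := by
  apply String.toList_inj.mp
  rw [PySem.Str.toList_join]
  simp only [String.toList_append, PySem.Str.toList_join, List.map_append]
  exact chars_join_append _ _ _ (by simpa) (by simpa)

-- glue(join l1, join l2) = join (l1 ++ l2) when no element is the empty string
theorem glue_join (l1 l2 : List String) (h : ∀ s ∈ l1 ++ l2, s ≠ "") :
    glueStr (PySem.Str.join " & " l1) (PySem.Str.join " & " l2)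
      = PySem.Str.join " & " (l1 ++ l2) := by
  cases l1 with
  | nil =>
    rw [join_nil']
    simp [glueStr]
  | cons a t =>
    cases l2 with
    | nil =>
      rw [join_nil']
      simp [glueStr]
    | cons b r =>
      have ha : a ≠ "" := h a (by simp)
      have hb : b ≠ "" := h b (by simp)
      rw [glueStr, if_pos ⟨join_cons_ne a t ha, join_cons_ne b r hb⟩,
        join_append (a :: t) (b :: r) (by simp) (by simp)]

-- the left-to-right pass: collected entries are joins of ever longer prefixes
theorem prefFoldGen (m : List String) (acc : List String) (p : List String)
    (hm : ∀ s ∈ m, s ≠ "") (hp : ∀ s ∈ p, s ≠ "") :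
    m.foldl (fun st x => (st.1 ++ [st.2], glueStr st.2 x)) (acc, PySem.Str.join " & " p)
      = (acc ++ (List.range m.length).map (fun j => PySem.Str.join " & " (p ++ m.take j)),
         PySem.Str.join " & " (p ++ m)) := by
  induction m generalizing acc p with
  | nil => simp
  | cons x t ih =>
    have hx : x ≠ "" := hm x (by simp)
    have hpx : ∀ s ∈ p ++ [x], s ≠ "" := by
      intro s hs
      rcases List.mem_append.mp hs with h' | h'
      · exact hp s h'
      · simp at h'; subst h'; exact hx
    have hstep : glueStr (PySem.Str.join " & " p) x = PySem.Str.join " & " (p ++ [x]) := by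
      have hg := glue_join p [x] hpx
      rw [join_single] at hg
      exact hg
    rw [List.foldl_cons, hstep, ih (acc ++ [PySem.Str.join " & " p]) (p ++ [x])
      (fun s hs => hm s (by simp [hs])) hpx]
    simp only [List.length_cons]
    rw [List.range_succ_eq_map]
    simp [List.map_map, Function.comp_def, List.append_assoc]

-- the right-to-left pass: collected entries are joins of reversed ever longer prefixes
theorem sufFoldGen (m : List String) (acc : List String) (r : List String)
    (hm : ∀ s ∈ m, s ≠ "") (hr : ∀ s ∈ r, s ≠ "") :
    m.foldl (fun st x => (st.1 ++ [st.2], glueStr x st.2)) (acc, PySem.Str.join " & " r)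
      = (acc ++ (List.range m.length).map
            (fun j => PySem.Str.join " & " ((m.take j).reverse ++ r)),
         PySem.Str.join " & " (m.reverse ++ r)) := by
  induction m generalizing acc r with
  | nil => simp
  | cons x t ih =>
    have hx : x ≠ "" := hm x (by simp)
    have hxr : ∀ s ∈ x :: r, s ≠ "" := by
      intro s hs
      rcases List.mem_cons.mp hs with h' | h'
      · subst h'; exact hx
      · exact hr s h'
    have hstep : glueStr x (PySem.Str.join " & " r) = PySem.Str.join " & " (x :: r) := by
      have hg := glue_join [x] r (by simpa using hxr)
      rw [join_single] at hg
      simpa using hg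
    rw [List.foldl_cons, hstep, ih (acc ++ [PySem.Str.join " & " r]) (x :: r)
      (fun s hs => hm s (by simp [hs])) hxr]
    simp only [List.length_cons]
    rw [List.range_succ_eq_map]
    simp [List.map_map, Function.comp_def, List.append_assoc]

-- every negated literal is a nonempty string
theorem negMap_ne (L : List String) : ∀ s ∈ L.map (fun p => "~" ++ p), s ≠ "" := by
  intro s hs
  simp only [List.mem_map] at hs
  obtain ⟨p, _, rfl⟩ := hs
  intro h
  have := congrArg String.toList h
  simp at this

-- B's first pass produces the prefix joins
theorem prefPass (L : List String) :
    (L.foldl (fun st lit => (st.1 ++ [st.2], glueStr st.2 ("~" ++ lit)))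
        (([] : List String), "")).1
      = (List.range L.length).map
          (fun j => PySem.Str.join " & " ((L.map (fun p => "~" ++ p)).take j)) := by
  have h0 : (([] : List String), ("" : String))
      = (([] : List String), PySem.Str.join " & " ([] : List String)) := by rw [join_nil']
  rw [h0, ← List.foldl_map (f := fun p => ("~" : String) ++ p)
    (g := fun (st : List String × String) x => (st.1 ++ [st.2], glueStr st.2 x)),
    prefFoldGen _ [] [] (negMap_ne L) (by simp)]
  simp

-- B's second pass produces the suffix joins (before the final reverse)
theorem sufPass (L : List String) :
    (L.reverse.foldl (fun st lit => (st.1 ++ [st.2], glueStr ("~" ++ lit) st.2))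
        (([] : List String), "")).1
      = (List.range L.length).map
          (fun j => PySem.Str.join " & " (((L.map (fun p => "~" ++ p)).reverse.take j).reverse)) := by
  have h0 : (([] : List String), ("" : String))
      = (([] : List String), PySem.Str.join " & " ([] : List String)) := by rw [join_nil']
  rw [h0, ← List.foldl_map (f := fun p => ("~" : String) ++ p)
    (g := fun (st : List String × String) x => (st.1 ++ [st.2], glueStr x st.2)),
    List.map_reverse,
    sufFoldGen _ [] [] (by
      intro s hs
      exact negMap_ne L s (List.mem_reverse.mp hs)) (by simp)]
  simp

-- ===== VERDICT (by name: the statement is the Claim_ definition above) =====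
theorem axiom_generator_at_most_one_wumpus_spec : Claim_equal_axiom_generator_at_most_one_wumpus := by
  intro xmin xmax ymin ymax _
  unfold Spec_axiom_generator_at_most_one_wumpus
  unfold axiom_generator_at_most_one_wumpus axiom_generator_at_most_one_wumpus_alt
  rw [aLoopX_eq]
  set C := (PySem.List.pyRange xmin (xmax + 1) 1).flatMap
      (fun u => (PySem.List.pyRange ymin (ymax + 1) 1).map (fun v => (u, v))) with hC
  -- B's lits are the positive literals of the cells of C, in order
  have hlits : (PySem.List.pyRange xmin (xmax + 1) 1).flatMap
      (fun x => (PySem.List.pyRange ymin (ymax + 1) 1).map (fun y => wumpusStr x y))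
      = C.map (fun c => wumpusStr c.1 c.2) := by
    rw [hC, List.map_flatMap]
    simp [List.map_map, Function.comp_def]
  rw [hlits]
  simp only [List.nil_append, PySem.List.foldl_append_ite_eq_filter,
    PySem.List.foldl_append_singleton_eq_map, prefPass, sufPass]
  congr 1
  apply List.ext_getElem
  · simp
  · intro i h1 h2
    have hiC : i < C.length := by simpa using h1
    have hnd := cells_nodup xmin xmax ymin ymax
    rw [← hC] at hnd
    simp only [List.getElem_map, List.getElem_zip, List.getElem_reverse, List.getElem_range,
      List.length_map, List.length_range]
    rw [filter_ne_getElem C hnd i hiC]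
    have hiL : i < ((C.map (fun c => wumpusStr c.1 c.2)).map (fun p => "~" ++ p)).length := by
      simpa using hiC
    have htr : (((C.map (fun c => wumpusStr c.1 c.2)).map (fun p => "~" ++ p)).reverse.take
          (C.length - 1 - i)).reverse
        = ((C.map (fun c => wumpusStr c.1 c.2)).map (fun p => "~" ++ p)).drop (i + 1) := by
      rw [List.take_reverse]
      simp only [List.reverse_reverse, List.length_map]
      congr 1
      simp only [List.length_map] at hiL
      omega
    rw [htr, glue_join _ _ (by
      intro s hs
      rcases List.mem_append.mp hs with h' | h'
      · exact negMap_ne _ s (List.mem_of_mem_take h')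
      · exact negMap_ne _ s (List.mem_of_mem_drop h'))]
    simp [List.map_take, List.map_drop, List.map_map, Function.comp_def]
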